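-- pv_equiv track=rewrite | github.com/mcarrickscott/modarith | simd/pseudo_ifma.py | makebig
-- ===== SOURCE A (Python) =====
-- def makebig(p,base,N) :
--     pw=[]
--     i=0
--     b=2**base
--     tp=p
--     while i<N :
--         pw.append(tp%b)
--         tp=tp>>base
--         i=i+1
--     return pw
-- ===== SOURCE B (Python) =====
-- def _split(p, base, N, b):
--     # divide-and-conquer: split p into the low N//2 limbs and the high rest, recurse on both halves
--     if N <= 0:
--         return []
--     if N == 1:
--         return [p % b]
--     h = N // 2
--     s = base * h
--     q = p >> s
--     return _split(p - (q << s), base, h, b) + _split(q, base, N - h, b)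
--
-- def makebig(p, base, N):
--     return _split(p, base, N, 2**base)
-- ===== Notes on version B (the rewrite author's own statement) =====
-- stated objective: alternative
-- what changed: Replaces A's sequential while-loop that threads a shifted accumulator (one shift of the remaining value per limb) by a balanced divide-and-conquer recursion: one shift by base*(N//2) splits p into the low-half and high-half limbs, each half handled recursively and the output built by concatenating the two halves; much less big-integer traffic when p is large, at a recursion-overhead cost on small inputs.
import Mathlib
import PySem

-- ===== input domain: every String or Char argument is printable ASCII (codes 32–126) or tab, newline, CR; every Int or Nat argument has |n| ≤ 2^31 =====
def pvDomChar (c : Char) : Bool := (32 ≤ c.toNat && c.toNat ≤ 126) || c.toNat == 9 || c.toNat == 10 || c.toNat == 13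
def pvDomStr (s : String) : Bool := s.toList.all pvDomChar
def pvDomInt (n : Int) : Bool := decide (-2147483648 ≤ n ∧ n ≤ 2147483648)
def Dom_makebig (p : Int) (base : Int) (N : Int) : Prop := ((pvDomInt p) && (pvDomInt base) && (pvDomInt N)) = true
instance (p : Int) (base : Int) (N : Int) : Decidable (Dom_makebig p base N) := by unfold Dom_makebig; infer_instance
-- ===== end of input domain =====

-- B is a divide-and-conquer re-implementation: one shift by base*(N//2) splits p into the
-- low-half and high-half limbs, each handled recursively (no sequential shifted accumulator).


-- ===== PORT A =====
-- the while-loop: each iteration appends tp % b and replaces tp by tp >> base; fuel = N - i.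
-- 'tp >> base' is ported as 'tp >>> base.toNat' and 'b = 2**base' as '2 ^ base.toNat': exact for
-- base ≥ 0 (guaranteed by Pre_ whenever the loop body runs; Python raises for base < 0 there).
-- pw is the growing result list (kept reversed so each append is a cons; reversed once at the end)
def makebigLoop (base b : Int) : Int → Nat → List Int → List Int
  | _, 0, pw => pw.reverse
  | tp, n + 1, pw => makebigLoop base b (tp >>> base.toNat) n (PySem.Int.mod tp b :: pw)

def makebig (p : Int) (base : Int) (N : Int) : List Int :=
  makebigLoop base ((2 : Int) ^ base.toNat) p N.toNat []

-- ===== PORT B =====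
-- Source B's _split: N<=0 -> []; N==1 -> [p % b]; else h=N//2, s=base*h, q=p>>s, and
-- result = _split(p - (q<<s), base, h, b) ++ _split(q, base, N-h, b).  'p >> s' / 'q << s' are
-- ported as '>>> s.toNat' / '<<< s' (exact for base ≥ 0, which Pre_ guarantees when they run).
def makebigSplit (base b : Int) (p : Int) (N : Int) : List Int :=
  if N ≤ 0 then []
  else if N = 1 then [PySem.Int.mod p b]
  else
    let h := PySem.Int.floordiv N 2
    let s := (base * h).toNat
    let q := p >>> s
    makebigSplit base b (p - (q <<< s)) h ++ makebigSplit base b q (N - h)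
termination_by N.toNat
decreasing_by
  all_goals
    simp only [PySem.Int.floordiv_eq_ediv_of_pos (show (0:Int) < 2 by omega)]
    omega

def makebig_alt (p : Int) (base : Int) (N : Int) : List Int :=
  makebigSplit base ((2 : Int) ^ base.toNat) p N

-- ===== PRECONDITION & SPEC =====
-- Pre_ excludes only base < 0 with N ≥ 1: there Python A computes a float 2**base and then raises
-- ValueError ('negative shift count') on tp >> base, returning no value (B misbehaves there too).
def Pre_makebig (p : Int) (base : Int) (N : Int) : Prop := 0 ≤ base ∨ N ≤ 0
instance (p : Int) (base : Int) (N : Int) : Decidable (Pre_makebig p base N) := by unfold Pre_makebig; infer_instance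
def pvWitness_makebig : Int × Int × Int := (-12345, 3, 7)
def Spec_makebig (p : Int) (base : Int) (N : Int) (out : List Int) : Prop := out = makebig_alt p base N
instance (p : Int) (base : Int) (N : Int) (out : List Int) : Decidable (Spec_makebig p base N out) := by unfold Spec_makebig; infer_instance

-- ===== CLAIM (what is proved, stated in full; the proofs are below) =====
def Claim_equal_makebig : Prop := ∀ (p : Int) (base : Int) (N : Int), Dom_makebig p base N → Pre_makebig p base N → Spec_makebig p base N (makebig p base N)

-- ===== LEMMAS AND PROOFS =====

-- Python's x & (2^k - 1) equals the nonnegative remainder x mod 2^k, also for negative x.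
theorem pv_band_mask (x : Int) (k : Nat) : PySem.Int.band x ((2 : Int) ^ k - 1) = x % (2 : Int) ^ k := by
  have hk : (1 : Int) ≤ 2 ^ k := one_le_pow₀ (by norm_num)
  have hm : (0 : Int) ≤ 2 ^ k - 1 := by omega
  have hcast : ((2 : Int) ^ k).toNat = 2 ^ k := by
    rw [show (2:Int)^k = ((2^k : Nat) : Int) by push_cast; ring, Int.toNat_natCast]
  unfold PySem.Int.band
  by_cases hx : 0 ≤ x
  · rw [if_pos hx, if_pos hm]
    have h1 : ((2:Int)^k - 1).toNat = 2^k - 1 := by omega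
    rw [h1, Nat.and_two_pow_sub_one_eq_mod]
    rw [show x = ((x.toNat : Nat) : Int) by omega]
    push_cast
    rw [Int.toNat_natCast]
  · rw [if_neg hx, if_pos hm]
    have h1 : ((2:Int)^k - 1).toNat = 2^k - 1 := by omega
    set y : Nat := (-x - 1).toNat with hy
    rw [h1, Nat.and_comm, Nat.and_two_pow_sub_one_eq_mod]
    have hadd : (x + (y : Int)) % (2:Int)^k = (x % 2^k + (y:Int) % 2^k) % 2^k := Int.add_emod _ _ _
    have hneg1 : ((-1 : Int)) % (2:Int)^k = 2^k - 1 := by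
      rw [show (-1 : Int) = 2^k - 1 - 2^k by ring, Int.sub_emod_right, Int.emod_eq_of_lt (by omega) (by omega)]
    have hxsum : x + (y : Int) = -1 := by omega
    have hb1 : 0 ≤ x % (2:Int)^k := Int.emod_nonneg x (by omega)
    have hb2 : x % (2:Int)^k < 2^k := Int.emod_lt_of_pos x (by omega)
    have hb3 : 0 ≤ (y:Int) % (2:Int)^k := Int.emod_nonneg _ (by omega)
    have hb4 : (y:Int) % (2:Int)^k < 2^k := Int.emod_lt_of_pos _ (by omega)
    have hyq : ((y % 2^k : Nat) : Int) = (y : Int) % (2:Int)^k := by push_cast; ring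
    rw [hxsum, hneg1] at hadd
    have hsum : x % (2:Int)^k + (y:Int) % (2:Int)^k = 2^k - 1 := by
      by_cases hlt : x % (2:Int)^k + (y:Int) % 2^k < 2^k
      · rw [Int.emod_eq_of_lt (by omega) hlt] at hadd; omega
      · have : (x % (2:Int)^k + (y:Int) % 2^k - 2^k) % 2^k = 2^k - 1 := by
          rw [Int.sub_emod_right]; exact hadd.symm
        rw [Int.emod_eq_of_lt (by omega) (by omega)] at this; omega
    omega

theorem pv_mod_pow (x : Int) (k : Nat) : PySem.Int.mod x ((2:Int) ^ k) = x % (2:Int) ^ k := by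
  unfold PySem.Int.mod
  exact Int.fmod_eq_emod_of_nonneg x (by positivity)

-- the A-loop computes exactly the direct slices of its starting value
theorem pv_loop_eq (base : Int) :
    ∀ (n : Nat) (x : Int) (acc : List Int),
      makebigLoop base ((2 : Int) ^ base.toNat) x n acc =
        acc.reverse ++ (List.range n).map
          (fun i => PySem.Int.band (x >>> (i * base.toNat)) ((2 : Int) ^ base.toNat - 1)) := by
  intro n
  induction n with
  | zero => intro x acc; simp [makebigLoop]
  | succ m ih =>
    intro x acc
    rw [makebigLoop, ih, List.reverse_cons, List.append_assoc]
    congr 1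
    rw [List.range_succ_eq_map]
    simp only [List.map_cons, List.map_map, List.singleton_append]
    congr 1
    · rw [pv_band_mask, pv_mod_pow]
      norm_num
    · apply List.map_congr_left
      intro i _
      simp only [Function.comp]
      rw [← Int.shiftRight_add, show base.toNat + i * base.toNat = i.succ * base.toNat by
        rw [Nat.succ_mul]; omega]

-- A as a closed map of Euclidean quotients/remainders of p
theorem pv_A_map (p base : Int) (N : Int) :
    makebig p base N =
      (List.range N.toNat).map
        (fun i => (p / (2:Int) ^ (i * base.toNat)) % (2:Int) ^ base.toNat) := by
  unfold makebig
  rw [pv_loop_eq]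
  rw [List.reverse_nil, List.nil_append]
  apply List.map_congr_left
  intro i _
  rw [pv_band_mask, Int.shiftRight_eq_div_pow]
  push_cast
  ring_nf

-- low half: taking limbs below H of (x mod 2^(H*k)) gives the limbs of x
theorem pv_low (x : Int) (k i e : Nat) :
    ((x % (2:Int) ^ (i * k + (k + e))) / (2:Int) ^ (i * k)) % (2:Int) ^ k
      = (x / (2:Int) ^ (i * k)) % (2:Int) ^ k := by
  have hik : (0:Int) < 2 ^ (i*k) := by positivity
  set q : Int := x / (2:Int) ^ (i * k + (k + e)) with hq
  have hmod : x % (2:Int) ^ (i * k + (k + e)) = x + (-((2:Int)^(k+e) * q)) * (2:Int)^(i*k) := by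
    rw [Int.emod_def, hq]
    rw [pow_add]
    ring
  rw [hmod, Int.add_mul_ediv_right _ _ (by omega : ((2:Int)^(i*k)) ≠ 0)]
  rw [show x / (2:Int)^(i*k) + -((2:Int)^(k+e) * q)
        = x / (2:Int)^(i*k) + (2:Int)^k * (-((2:Int)^e * q)) by rw [pow_add]; ring]
  exact Int.add_mul_emod_self_left _ _ _

-- high half: a limb of x / 2^(H*k) is a limb of x at offset H
theorem pv_high (x : Int) (k i H : Nat) :
    (x / (2:Int) ^ (H * k)) / (2:Int) ^ (i * k) = x / (2:Int) ^ ((H + i) * k) := by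
  rw [Int.ediv_ediv_of_nonneg (by positivity : (0:Int) ≤ 2 ^ (H*k)), ← pow_add, Nat.add_mul]

-- B equals the same closed map, by strong induction on the fuel N.toNat
theorem pv_B_map (base : Int) (hb : 0 ≤ base) :
    ∀ (n : Nat) (N p : Int), N.toNat = n →
      makebigSplit base ((2 : Int) ^ base.toNat) p N =
        (List.range n).map
          (fun i => (p / (2:Int) ^ (i * base.toNat)) % (2:Int) ^ base.toNat) := by
  intro n
  induction n using Nat.strong_induction_on with
  | _ n ih =>
    intro N p hn
    by_cases h0 : N ≤ 0
    · have : n = 0 := by omega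
      subst this
      simp [makebigSplit, h0]
    · by_cases h1 : N = 1
      · subst h1
        have : n = 1 := by omega
        subst this
        rw [makebigSplit]
        simp
      · have h2 : 2 ≤ N := by omega
        rw [makebigSplit, if_neg h0, if_neg h1]
        simp only
        rw [PySem.Int.floordiv_eq_ediv_of_pos (by omega : (0:Int) < 2)]
        set k : Nat := base.toNat with hk
        set h : Int := N / 2 with hh
        have hh1 : 1 ≤ h := by omega
        have hhN : h < N := by omega
        set H : Nat := h.toNat with hH
        have hbh : base * h = ((H * k : Nat) : Int) := by
          push_cast [hH, hk, Int.toNat_of_nonneg hb, Int.toNat_of_nonneg (by omega : (0:Int) ≤ h)]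
          ring
        have hs : (base * h).toNat = H * k := by rw [hbh, Int.toNat_natCast]
        have hq : p >>> (H * k) = p / (2:Int) ^ (H * k) := by
          rw [Int.shiftRight_eq_div_pow]; push_cast; ring_nf
        have hl : p - ((p >>> (H * k)) <<< (H * k)) = p % (2:Int) ^ (H * k) := by
          rw [hq, Int.shiftLeft_eq, Int.emod_def]; ring
        rw [hs, hl, hq]
        have hHlt : H < n := by omega
        have hRlt : (N - h).toNat < n := by omega
        have hsplit : n = H + (N - h).toNat := by omega
        rw [ih H hHlt h _ rfl, ih (N - h).toNat hRlt (N - h) _ rfl]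
        rw [hsplit, List.range_add, List.map_append, List.map_map]
        congr 1
        · apply List.map_congr_left
          intro i hi
          simp only [List.mem_range] at hi
          obtain ⟨d, hd⟩ : ∃ d, H = i + 1 + d := ⟨H - i - 1, by omega⟩
          rw [show H * k = i * k + (k + d * k) by rw [hd]; ring]
          exact pv_low p k i (d * k)
        · apply List.map_congr_left
          intro i _
          simp only [Function.comp]
          rw [pv_high p k i H, Nat.add_comm H i]

-- ===== VERDICT (by name: the statement is the Claim_ definition above) =====
theorem makebig_spec : Claim_equal_makebig := by
  intro p base N _ hpre
  unfold Spec_makebig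
  by_cases hN : N ≤ 0
  · have h0 : N.toNat = 0 := by omega
    unfold makebig
    rw [h0]
    rw [makebig_alt, makebigSplit, if_pos hN]
    rfl
  · have hb : 0 ≤ base := hpre.resolve_right hN
    rw [pv_A_map, makebig_alt, pv_B_map base hb N.toNat N p rfl]
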